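-- pv_equiv track=rewrite | github.com/dzaramelcone/exercises | graphs/stringsCanFormCircle.py | can_form_circle
-- ===== SOURCE A (Python) =====
-- from collections import deque
--
-- def can_form_circle(strings):
--   strings = [string for string in strings if string]
--   if not strings:
--     return False
--
--   adj = {}
--   for string in strings:
--     if string[0] not in adj:
--       adj[string[0]] = []
--     adj[string[0]].append(string[-1])
--
--   visited = set()
--   queue = deque()
--   seen_cycle = False
--   if strings[0]:
--     queue.append(strings[0][0])
--     visited.add(strings[0][0])
--
--   while queue:
--     cur = queue.popleft()
--     if cur not in adj:
--       continue
--     for edge in adj[cur]: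
--         if edge in visited:
--           seen_cycle = True
--         else:
--           queue.append(edge)
--           visited.add(edge)
--
--   # if "all the strings in the array can be chained".
--   # it is not necessarily clear to me whether the question is asking:
--   #    a) each string must be visited exactly once before a cycle is found?
--   #    b) each string must be visited at least once and a cycle must exist?
--   #    c) a cycle must exist, but there is no requirement on which strings are visited?
--
--   # if a, return len(strings) == len(visited) when the first edge in visited is in adj[cur] on line 39
--   # if b, create a bool and mark it true when the first edge in visited is in adj[cur] on line 39, then return whether its true and len(strings) == len(visited)
--   # if c, simply return seen_cycle on line 58.
--
--   # I implemented b here.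
--   return seen_cycle and len(strings) == len(visited)
-- ===== SOURCE B (Python) =====
-- def can_form_circle(strings):
--     strings = [s for s in strings if s]
--     if not strings:
--         return False
--
--     adj = {}
--     for s in strings:
--         adj.setdefault(s[0], []).append(s[-1])
--
--     # iterative DFS that only accumulates the set of reachable characters
--     start = strings[0][0]
--     reachable = {start}
--     stack = [start]
--     while stack:
--         cur = stack.pop()
--         for e in adj.get(cur, []):
--             if e not in reachable:
--                 reachable.add(e)
--                 stack.append(e)
--
--     # every reachable node except the start was discovered by exactly one edge,
--     # so a revisited edge exists iff the scanned edge count reaches |reachable|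
--     total_edges = sum(len(adj[c]) for c in reachable if c in adj)
--     return total_edges >= len(reachable) and len(strings) == len(reachable)
-- ===== Notes on version B (the rewrite author's own statement) =====
-- stated objective: simpler
-- what changed: B drops A's inline seen_cycle flag and BFS queue: it runs a plain stack-based DFS that only accumulates the reachable character set, then decides the cycle by counting (total out-degree of reachable nodes >= number of reachable nodes), returning the same conjunction with the visited-count check.
import Mathlib
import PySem

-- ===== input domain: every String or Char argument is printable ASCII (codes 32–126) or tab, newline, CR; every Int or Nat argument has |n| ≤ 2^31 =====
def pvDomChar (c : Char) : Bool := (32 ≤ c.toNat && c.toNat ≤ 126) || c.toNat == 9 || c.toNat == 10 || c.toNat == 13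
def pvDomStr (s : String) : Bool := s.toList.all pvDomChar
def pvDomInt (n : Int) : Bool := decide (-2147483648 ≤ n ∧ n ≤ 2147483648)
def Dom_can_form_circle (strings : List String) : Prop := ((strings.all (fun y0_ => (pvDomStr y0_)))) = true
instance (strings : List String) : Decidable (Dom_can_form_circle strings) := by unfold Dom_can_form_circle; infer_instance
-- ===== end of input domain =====

-- B replaces A's inline seen_cycle flag by a plain reachability traversal plus an
-- edge-count comparison (total reachable out-degree ≥ #reachable nodes); objective: simpler.

-- ===== PORT A =====
-- first/last character of a string (in every use below the string is nonempty,
-- so the .getD default is never consulted)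
def pvFirst (s : String) : Char := (PySem.Str.pyGet? s 0).getD ' '
def pvLast (s : String) : Char := (PySem.Str.pyGet? s (-1)).getD ' '

-- adj = {}; for string in strings: if string[0] not in adj: adj[string[0]] = []; adj[string[0]].append(string[-1])
def pvAdjA (ss : List String) : PySem.Dict Char (List Char) :=
  ss.foldl (fun adj s =>
    (if adj.contains (pvFirst s) then adj else adj.insert (pvFirst s) []).modify
      (pvFirst s) [] (fun l => l ++ [pvLast s]))
    PySem.Dict.empty

-- the 'while queue' BFS loop, carrying (queue, visited, seen_cycle); fuel only
-- makes the recursion structural (the fuel passed below is proved sufficient)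
def pvBfsA (adj : PySem.Dict Char (List Char)) :
    Nat → List Char → PySem.Set Char → Bool → (PySem.Set Char × Bool)
  | 0, _, vis, flag => (vis, flag)
  | _ + 1, [], vis, flag => (vis, flag)
  | fuel + 1, cur :: q, vis, flag =>
    match adj.get? cur with
    | none => pvBfsA adj fuel q vis flag          -- 'if cur not in adj: continue'
    | some es =>
      let st := es.foldl (fun (s : List Char × PySem.Set Char × Bool) e =>
        if PySem.Set.contains s.2.1 e then (s.1, s.2.1, true)
        else (s.1 ++ [e], PySem.Set.add s.2.1 e, s.2.2)) (q, vis, flag)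
      pvBfsA adj fuel st.1 st.2.1 st.2.2

def can_form_circle (strings : List String) : Bool :=
  let ss := strings.filter (fun s => !(s == ""))
  match ss with
  | [] => false
  | s0 :: _ =>
    let adj := pvAdjA ss
    let qv := if !(s0 == "") then
        ([pvFirst s0], PySem.Set.add PySem.Set.empty (pvFirst s0))
      else (([] : List Char), (PySem.Set.empty : PySem.Set Char))
    let r := pvBfsA adj (adj.values.flatten.length + 2) qv.1 qv.2 false
    r.2 && (ss.length == r.1.length)

-- ===== PORT B =====
-- adj = {}; for s in strings: adj.setdefault(s[0], []).append(s[-1])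
def pvAdjB (ss : List String) : PySem.Dict Char (List Char) :=
  ss.foldl (fun adj s =>
    (adj.setdefault (pvFirst s) []).modify (pvFirst s) [] (fun l => l ++ [pvLast s]))
    PySem.Dict.empty

-- iterative DFS accumulating only the reachable set (stack top = list head)
def pvDfsB (adj : PySem.Dict Char (List Char)) :
    Nat → List Char → PySem.Set Char → PySem.Set Char
  | 0, _, vis => vis
  | _ + 1, [], vis => vis
  | fuel + 1, cur :: st, vis =>
    let r := (adj.getD cur []).foldl (fun (s : List Char × PySem.Set Char) e =>
      if PySem.Set.contains s.2 e then s else (e :: s.1, PySem.Set.add s.2 e)) (st, vis)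
    pvDfsB adj fuel r.1 r.2

def can_form_circle_alt (strings : List String) : Bool :=
  let ss := strings.filter (fun s => !(s == ""))
  match ss with
  | [] => false
  | s0 :: _ =>
    let adj := pvAdjB ss
    let start := pvFirst s0
    let reach := pvDfsB adj (adj.values.flatten.length + 2) [start]
      (PySem.Set.add PySem.Set.empty start)
    let total := reach.foldl
      (fun acc c => if adj.contains c then acc + (adj.getD c []).length else acc) 0
    (decide (reach.length ≤ total)) && (ss.length == reach.length)

-- ===== PRECONDITION & SPEC =====
def Spec_can_form_circle (strings : List String) (out : Bool) : Prop := out = can_form_circle_alt strings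
instance (strings : List String) (out : Bool) : Decidable (Spec_can_form_circle strings out) := by unfold Spec_can_form_circle; infer_instance

-- ===== CLAIM (what is proved, stated in full; the proofs are below) =====
def Claim_equal_can_form_circle : Prop := ∀ (strings : List String), Dom_can_form_circle strings → Spec_can_form_circle strings (can_form_circle strings)

-- ===== LEMMAS AND PROOFS =====

-- out-degree of a character in the adjacency dict
def degOf (adj : PySem.Dict Char (List Char)) (c : Char) : Nat := (adj.getD c []).length

-- reachability along first→last-char edges
inductive PvReach (adj : PySem.Dict Char (List Char)) (a : Char) : Char → Prop
  | refl : PvReach adj a a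
  | step {b c : Char} : PvReach adj a b → c ∈ adj.getD b [] → PvReach adj a c

-- sum of out-degrees of already-processed nodes (visited and no longer queued)
def pSum (adj : PySem.Dict Char (List Char)) (q vis : List Char) : Nat :=
  ((vis.filter (fun c => !q.contains c)).map (degOf adj)).sum

theorem reach_mem {adj : PySem.Dict Char (List Char)} {a : Char} {V : List Char}
    (h0 : a ∈ V) (hcl : ∀ c ∈ V, ∀ e ∈ adj.getD c [], e ∈ V) :
    ∀ c, PvReach adj a c → c ∈ V := by
  intro c h
  induction h with
  | refl => exact h0
  | step hr he ih => exact hcl _ ih _ he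

theorem mem_getD_mem_flatten {adj : PySem.Dict Char (List Char)} {c e : Char}
    (h : e ∈ adj.getD c []) : e ∈ adj.values.flatten := by
  cases hg : adj.get? c with
  | none => rw [PySem.Dict.getD_of_get?_eq_none adj [] hg] at h; exact absurd h (List.not_mem_nil)
  | some es =>
    rw [PySem.Dict.getD_of_get?_eq_some adj [] hg] at h
    exact List.mem_flatten.mpr ⟨es, List.mem_map_of_mem (PySem.Dict.mem_items_of_get?_eq_some adj hg), h⟩

theorem pSum_pop (adj : PySem.Dict Char (List Char)) {vis q : List Char} {cur : Char}
    (hv : vis.Nodup) (hcur : cur ∈ vis) (hq : cur ∉ q) :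
    pSum adj q vis = pSum adj (cur :: q) vis + degOf adj cur := by
  have hperm : List.Perm (vis.filter (fun c => !q.contains c))
      (vis.filter (fun c => !(cur :: q).contains c) ++ [cur]) := by
    apply (List.perm_ext_iff_of_nodup (hv.filter _) ?_).mpr
    · intro x
      simp only [List.mem_filter, List.mem_append, Bool.not_eq_true',
        List.contains_eq_mem, decide_eq_false_iff_not, List.mem_cons]
      by_cases hx : x = cur
      · subst hx; simp [hcur, hq]
      · simp only [hx]; tauto
    · apply List.Nodup.append (hv.filter _) (List.nodup_singleton cur)
      intro x hx hx'
      rw [List.mem_singleton] at hx'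
      subst hx'
      simp only [List.mem_filter, Bool.not_eq_true', List.contains_eq_mem,
        decide_eq_false_iff_not, List.mem_cons] at hx
      tauto
  unfold pSum
  rw [(hperm.map (degOf adj)).sum_eq]
  simp

theorem pSum_extend (adj : PySem.Dict Char (List Char)) {vis q n : List Char}
    (hfresh : ∀ e ∈ n, e ∉ vis) :
    pSum adj (q ++ n) (vis ++ n) = pSum adj q vis := by
  unfold pSum
  rw [List.filter_append]
  have h2 : n.filter (fun c => !(q ++ n).contains c) = [] := by
    apply List.filter_eq_nil_iff.mpr
    intro e he
    simp [List.contains_eq_mem, he]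
  have h1 : vis.filter (fun c => !(q ++ n).contains c) = vis.filter (fun c => !q.contains c) := by
    apply List.filter_congr
    intro x hx
    have hxn : x ∉ n := fun hc => hfresh x hc hx
    simp [List.contains_eq_mem, hxn]
  rw [h1, h2, List.append_nil]

theorem diff_extend {cands vis n : List Char} (hn : n.Nodup)
    (hsub : ∀ e ∈ n, e ∈ cands) (hfresh : ∀ e ∈ n, e ∉ vis) :
    ((PySem.Set.ofList cands).diff vis).length
      = ((PySem.Set.ofList cands).diff (vis ++ n)).length + n.length := by
  have hperm : List.Perm ((PySem.Set.ofList cands).diff vis)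
      ((PySem.Set.ofList cands).diff (vis ++ n) ++ n) := by
    apply (List.perm_ext_iff_of_nodup (PySem.Set.nodup_diff _ _ (PySem.Set.nodup_ofList cands)) ?_).mpr
    · intro x
      simp only [PySem.Set.mem_diff, List.mem_append, PySem.Set.mem_ofList]
      by_cases hx : x ∈ n
      · simp [hx, hsub x hx, hfresh x hx]
      · simp only [hx]; tauto
    · apply List.Nodup.append (PySem.Set.nodup_diff _ _ (PySem.Set.nodup_ofList cands)) hn
      intro x hx hx'
      exact ((PySem.Set.mem_diff _ _ _).mp hx).2 (List.mem_append.mpr (Or.inr hx'))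
  have := hperm.length_eq
  simpa using this

theorem foldA_spec :
    ∀ (es q vis : List Char) (flag : Bool), vis.Nodup →
    ∃ n : List Char,
      es.foldl (fun (s : List Char × PySem.Set Char × Bool) e =>
        if PySem.Set.contains s.2.1 e then (s.1, s.2.1, true)
        else (s.1 ++ [e], PySem.Set.add s.2.1 e, s.2.2)) (q, vis, flag)
        = (q ++ n, vis ++ n, flag || decide (n.length < es.length))
      ∧ n.Nodup ∧ (∀ e ∈ n, e ∈ es ∧ e ∉ vis) ∧ (∀ e ∈ es, e ∈ vis ∨ e ∈ n) := by
  intro es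
  induction es with
  | nil => intro q vis flag _; exact ⟨[], by simp, by simp, by simp, by simp⟩
  | cons e es ih =>
    intro q vis flag hv
    by_cases he : e ∈ vis
    · have hc : PySem.Set.contains vis e = true := (PySem.Set.contains_iff vis e).mpr he
      obtain ⟨n, hfold, hnd, hmem, hcov⟩ := ih q vis true hv
      refine ⟨n, ?_, hnd, ?_, ?_⟩
      · have hlen : n.length ≤ es.length :=
          ((hnd.subperm (fun x hx => (hmem x hx).1)).length_le)
        simp only [List.foldl_cons, hc, if_true]
        rw [hfold]
        have : decide (n.length < es.length + 1) = true := by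
          simp; omega
        simp
        exact Or.inr hlen
      · exact fun x hx => ⟨List.mem_cons_of_mem e (hmem x hx).1, (hmem x hx).2⟩
      · intro x hx
        rcases List.mem_cons.mp hx with rfl | hx'
        · exact Or.inl he
        · exact hcov x hx'
    · have hc : PySem.Set.contains vis e = false := by
        rcases h : PySem.Set.contains vis e with _ | _
        · rfl
        · exact absurd ((PySem.Set.contains_iff vis e).mp h) he
      have hadd : PySem.Set.add vis e = vis ++ [e] := PySem.Set.add_of_not_mem he
      have hv' : (vis ++ [e]).Nodup := by
        simp only [List.nodup_append, List.nodup_singleton]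
        exact ⟨hv, trivial, fun a ha b hb => fun hab => he ((List.mem_singleton.mp hb) ▸ hab ▸ ha)⟩
      obtain ⟨n, hfold, hnd, hmem, hcov⟩ := ih (q ++ [e]) (vis ++ [e]) flag hv'
      refine ⟨e :: n, ?_, ?_, ?_, ?_⟩
      · simp only [List.foldl_cons, hc, if_false, Bool.false_eq_true, hadd]
        rw [hfold]
        simp [List.append_assoc]
      · refine List.nodup_cons.mpr ⟨fun hc' => (hmem e hc').2 (by simp), hnd⟩
      · intro x hx
        rcases List.mem_cons.mp hx with rfl | hx'
        · exact ⟨List.mem_cons_self, he⟩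
        · refine ⟨List.mem_cons_of_mem e (hmem x hx').1, fun hc' => (hmem x hx').2 (by simp [hc'])⟩
      · intro x hx
        rcases List.mem_cons.mp hx with rfl | hx'
        · exact Or.inr List.mem_cons_self
        · rcases hcov x hx' with hl | hr
          · rcases List.mem_append.mp hl with h1 | h1
            · exact Or.inl h1
            · exact Or.inr (by simp_all)
          · exact Or.inr (List.mem_cons_of_mem e hr)

theorem foldB_spec :
    ∀ (es st vis : List Char), vis.Nodup →
    ∃ n : List Char,
      es.foldl (fun (s : List Char × PySem.Set Char) e =>
        if PySem.Set.contains s.2 e then s else (e :: s.1, PySem.Set.add s.2 e)) (st, vis)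
        = (n.reverse ++ st, vis ++ n)
      ∧ n.Nodup ∧ (∀ e ∈ n, e ∈ es ∧ e ∉ vis) ∧ (∀ e ∈ es, e ∈ vis ∨ e ∈ n) := by
  intro es
  induction es with
  | nil => intro st vis _; exact ⟨[], by simp, by simp, by simp, by simp⟩
  | cons e es ih =>
    intro st vis hv
    by_cases he : e ∈ vis
    · have hc : PySem.Set.contains vis e = true := (PySem.Set.contains_iff vis e).mpr he
      obtain ⟨n, hfold, hnd, hmem, hcov⟩ := ih st vis hv
      refine ⟨n, ?_, hnd, ?_, ?_⟩
      · simp only [List.foldl_cons, hc, if_true]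
        exact hfold
      · exact fun x hx => ⟨List.mem_cons_of_mem e (hmem x hx).1, (hmem x hx).2⟩
      · intro x hx
        rcases List.mem_cons.mp hx with rfl | hx'
        · exact Or.inl he
        · exact hcov x hx'
    · have hc : PySem.Set.contains vis e = false := by
        rcases h : PySem.Set.contains vis e with _ | _
        · rfl
        · exact absurd ((PySem.Set.contains_iff vis e).mp h) he
      have hadd : PySem.Set.add vis e = vis ++ [e] := PySem.Set.add_of_not_mem he
      have hv' : (vis ++ [e]).Nodup := by
        simp only [List.nodup_append, List.nodup_singleton]
        exact ⟨hv, trivial, fun a ha b hb => fun hab => he ((List.mem_singleton.mp hb) ▸ hab ▸ ha)⟩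
      obtain ⟨n, hfold, hnd, hmem, hcov⟩ := ih (e :: st) (vis ++ [e]) hv'
      refine ⟨e :: n, ?_, ?_, ?_, ?_⟩
      · simp only [List.foldl_cons, hc, if_false, Bool.false_eq_true, hadd]
        rw [hfold]
        simp [List.append_assoc]
      · refine List.nodup_cons.mpr ⟨fun hc' => (hmem e hc').2 (by simp), hnd⟩
      · intro x hx
        rcases List.mem_cons.mp hx with rfl | hx'
        · exact ⟨List.mem_cons_self, he⟩
        · refine ⟨List.mem_cons_of_mem e (hmem x hx').1, fun hc' => (hmem x hx').2 (by simp [hc'])⟩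
      · intro x hx
        rcases List.mem_cons.mp hx with rfl | hx'
        · exact Or.inr List.mem_cons_self
        · rcases hcov x hx' with hl | hr
          · rcases List.mem_append.mp hl with h1 | h1
            · exact Or.inl h1
            · exact Or.inr (by simp_all)
          · exact Or.inr (List.mem_cons_of_mem e hr)

theorem bfsA_spec (adj : PySem.Dict Char (List Char)) (a : Char) :
    ∀ (fuel : Nat) (q vis : List Char) (flag : Bool),
    vis.Nodup → q.Nodup → (∀ c ∈ q, c ∈ vis) → a ∈ vis →
    (∀ c ∈ vis, PvReach adj a c) →
    (∀ c ∈ vis, c ∉ q → ∀ e ∈ adj.getD c [], e ∈ vis) →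
    vis.length ≤ pSum adj q vis + 1 →
    flag = decide (vis.length ≤ pSum adj q vis) →
    q.length + ((PySem.Set.ofList adj.values.flatten).diff vis).length < fuel →
    (pvBfsA adj fuel q vis flag).1.Nodup
    ∧ (∀ c, c ∈ (pvBfsA adj fuel q vis flag).1 ↔ PvReach adj a c)
    ∧ (pvBfsA adj fuel q vis flag).2
        = decide ((pvBfsA adj fuel q vis flag).1.length
            ≤ (((pvBfsA adj fuel q vis flag).1.map (degOf adj)).sum) ) := by
  intro fuel
  induction fuel with
  | zero => intro q vis flag _ _ _ _ _ _ _ _ hfuel; exact absurd hfuel (Nat.not_lt_zero _)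
  | succ fuel ih =>
    intro q vis flag hv hqnd hsub ha hreach hclosed hlen hflag hfuel
    match q with
    | [] =>
      simp only [pvBfsA]
      refine ⟨hv, ?_, ?_⟩
      · intro c
        exact ⟨hreach c, reach_mem ha (fun c hc => hclosed c hc (List.not_mem_nil)) c⟩
      · have : pSum adj [] vis = (vis.map (degOf adj)).sum := by
          unfold pSum
          simp
        simp only [← this]
        exact hflag
    | cur :: q' =>
      have hcur : cur ∈ vis := hsub cur List.mem_cons_self
      have hcq' : cur ∉ q' := (List.nodup_cons.mp hqnd).1
      have hq'nd : q'.Nodup := (List.nodup_cons.mp hqnd).2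
      cases hget : adj.get? cur with
      | none =>
        have hstep : pvBfsA adj (fuel + 1) (cur :: q') vis flag = pvBfsA adj fuel q' vis flag := by
          simp only [pvBfsA, hget]
        rw [hstep]
        have hdeg : degOf adj cur = 0 := by
          unfold degOf
          rw [PySem.Dict.getD_of_get?_eq_none adj [] hget]
          rfl
        have hps : pSum adj q' vis = pSum adj (cur :: q') vis := by
          rw [pSum_pop adj hv hcur hcq', hdeg]
          omega
        apply ih q' vis flag hv hq'nd (fun c hc => hsub c (List.mem_cons_of_mem cur hc)) ha hreach
        · intro c hc hcq
          by_cases hcc : c = cur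
          · subst hcc
            rw [PySem.Dict.getD_of_get?_eq_none adj [] hget]
            intro e he
            exact absurd he (List.not_mem_nil)
          · exact hclosed c hc (fun h => (List.mem_cons.mp h).elim hcc hcq)
        · rw [hps]; exact hlen
        · rw [hps]; exact hflag
        · have := diff_extend (n := []) List.nodup_nil (by simp) (by simp) (cands := adj.values.flatten) (vis := vis)
          simp only [List.length_cons] at hfuel
          omega
      | some es =>
        obtain ⟨n, hfold, hnnd, hmem, hcov⟩ := foldA_spec es q' vis flag hv
        have hdeg : adj.getD cur [] = es := PySem.Dict.getD_of_get?_eq_some adj [] hget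
        have hstep : pvBfsA adj (fuel + 1) (cur :: q') vis flag
            = pvBfsA adj fuel (q' ++ n) (vis ++ n) (flag || decide (n.length < es.length)) := by
          simp only [pvBfsA, hget, hfold]
        rw [hstep]
        have hfresh : ∀ e ∈ n, e ∉ vis := fun e he => (hmem e he).2
        have hnes : ∀ e ∈ n, e ∈ es := fun e he => (hmem e he).1
        have hnlen : n.length ≤ es.length := (hnnd.subperm hnes).length_le
        have hndisj : List.Disjoint vis n := fun a hav han => hfresh a han hav
        have hv' : (vis ++ n).Nodup := List.Nodup.append hv hnnd hndisj
        have hsubcands : ∀ e ∈ n, e ∈ adj.values.flatten := by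
          intro e he
          exact mem_getD_mem_flatten (c := cur) (hdeg ▸ hnes e he)
        have hps : pSum adj (q' ++ n) (vis ++ n) = pSum adj (cur :: q') vis + es.length := by
          rw [pSum_extend adj hfresh, pSum_pop adj hv hcur hcq']
          unfold degOf
          rw [hdeg]
        apply ih (q' ++ n) (vis ++ n) _ hv'
        · exact List.Nodup.append hq'nd hnnd
            (fun a haq han => hfresh a han (hsub a (List.mem_cons_of_mem cur haq)))
        · intro c hc
          rcases List.mem_append.mp hc with h1 | h1
          · exact List.mem_append.mpr (Or.inl (hsub c (List.mem_cons_of_mem cur h1)))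
          · exact List.mem_append.mpr (Or.inr h1)
        · exact List.mem_append.mpr (Or.inl ha)
        · intro c hc
          rcases List.mem_append.mp hc with h1 | h1
          · exact hreach c h1
          · exact PvReach.step (hreach cur hcur) (hdeg ▸ hnes c h1)
        · intro c hc hcq
          have hcn : c ∉ n := fun h => hcq (List.mem_append.mpr (Or.inr h))
          have hcv : c ∈ vis := (List.mem_append.mp hc).resolve_right hcn
          by_cases hcc : c = cur
          · subst hcc
            rw [hdeg]
            intro e he
            rcases hcov e he with h1 | h1
            · exact List.mem_append.mpr (Or.inl h1)
            · exact List.mem_append.mpr (Or.inr h1)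
          · intro e he
            exact List.mem_append.mpr (Or.inl (hclosed c hcv
              (fun h => (List.mem_cons.mp h).elim hcc (fun h' => hcq (List.mem_append.mpr (Or.inl h')))) e he))
        · rw [hps, List.length_append]
          omega
        · simp only [hps, List.length_append]
          rw [hflag]
          rcases Nat.lt_or_ge (pSum adj (cur :: q') vis) vis.length with h1 | h1
          · have e1 : decide (vis.length ≤ pSum adj (cur :: q') vis) = false := by
              simp; omega
            rw [e1, Bool.false_or]
            rcases Nat.lt_or_ge n.length es.length with h2 | h2
            · have e2 : decide (n.length < es.length) = true := by simp [h2]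
              have e3 : decide (vis.length + n.length
                  ≤ pSum adj (cur :: q') vis + es.length) = true := by
                simp; omega
              rw [e2, e3]
            · have hne : n.length = es.length := Nat.le_antisymm hnlen h2
              have e2 : decide (n.length < es.length) = false := by simp; omega
              have e3 : decide (vis.length + n.length
                  ≤ pSum adj (cur :: q') vis + es.length) = false := by
                simp; omega
              rw [e2, e3]
          · have e1 : decide (vis.length ≤ pSum adj (cur :: q') vis) = true := by simp [h1]
            have e3 : decide (vis.length + n.length
                ≤ pSum adj (cur :: q') vis + es.length) = true := by
              simp; omega
            rw [e1, e3, Bool.true_or]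
        · have hde := diff_extend hnnd hsubcands hfresh (cands := adj.values.flatten)
          simp only [List.length_append, List.length_cons] at hfuel ⊢
          omega

theorem dfsB_spec (adj : PySem.Dict Char (List Char)) (a : Char) :
    ∀ (fuel : Nat) (st vis : List Char),
    vis.Nodup → st.Nodup → (∀ c ∈ st, c ∈ vis) → a ∈ vis →
    (∀ c ∈ vis, PvReach adj a c) →
    (∀ c ∈ vis, c ∉ st → ∀ e ∈ adj.getD c [], e ∈ vis) →
    st.length + ((PySem.Set.ofList adj.values.flatten).diff vis).length < fuel →
    (pvDfsB adj fuel st vis).Nodup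
    ∧ (∀ c, c ∈ pvDfsB adj fuel st vis ↔ PvReach adj a c) := by
  intro fuel
  induction fuel with
  | zero => intro st vis _ _ _ _ _ _ hfuel; exact absurd hfuel (Nat.not_lt_zero _)
  | succ fuel ih =>
    intro st vis hv hstnd hsub ha hreach hclosed hfuel
    match st with
    | [] =>
      simp only [pvDfsB]
      exact ⟨hv, fun c => ⟨hreach c, reach_mem ha (fun c hc => hclosed c hc (List.not_mem_nil)) c⟩⟩
    | cur :: st' =>
      have hcur : cur ∈ vis := hsub cur List.mem_cons_self
      have hcst' : cur ∉ st' := (List.nodup_cons.mp hstnd).1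
      have hst'nd : st'.Nodup := (List.nodup_cons.mp hstnd).2
      obtain ⟨n, hfold, hnnd, hmem, hcov⟩ := foldB_spec (adj.getD cur []) st' vis hv
      have hstep : pvDfsB adj (fuel + 1) (cur :: st') vis
          = pvDfsB adj fuel (n.reverse ++ st') (vis ++ n) := by
        simp only [pvDfsB, hfold]
      rw [hstep]
      have hfresh : ∀ e ∈ n, e ∉ vis := fun e he => (hmem e he).2
      have hnes : ∀ e ∈ n, e ∈ adj.getD cur [] := fun e he => (hmem e he).1
      have hv' : (vis ++ n).Nodup :=
        List.Nodup.append hv hnnd (fun a hav han => hfresh a han hav)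
      have hsubcands : ∀ e ∈ n, e ∈ adj.values.flatten :=
        fun e he => mem_getD_mem_flatten (c := cur) (hnes e he)
      apply ih (n.reverse ++ st') (vis ++ n) hv'
      · exact List.Nodup.append (List.nodup_reverse.mpr hnnd) hst'nd
          (fun a han hast => hfresh a (List.mem_reverse.mp han)
            (hsub a (List.mem_cons_of_mem cur hast)))
      · intro c hc
        rcases List.mem_append.mp hc with h1 | h1
        · exact List.mem_append.mpr (Or.inr (List.mem_reverse.mp h1))
        · exact List.mem_append.mpr (Or.inl (hsub c (List.mem_cons_of_mem cur h1)))
      · exact List.mem_append.mpr (Or.inl ha)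
      · intro c hc
        rcases List.mem_append.mp hc with h1 | h1
        · exact hreach c h1
        · exact PvReach.step (hreach cur hcur) (hnes c h1)
      · intro c hc hcq
        have hcn : c ∉ n := fun h => hcq (List.mem_append.mpr (Or.inl (List.mem_reverse.mpr h)))
        have hcv : c ∈ vis := (List.mem_append.mp hc).resolve_right hcn
        by_cases hcc : c = cur
        · subst hcc
          intro e he
          rcases hcov e he with h1 | h1
          · exact List.mem_append.mpr (Or.inl h1)
          · exact List.mem_append.mpr (Or.inr h1)
        · intro e he
          exact List.mem_append.mpr (Or.inl (hclosed c hcv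
            (fun h => (List.mem_cons.mp h).elim hcc
              (fun h' => hcq (List.mem_append.mpr (Or.inr h')))) e he))
      · have hde := diff_extend hnnd hsubcands hfresh (cands := adj.values.flatten)
        simp only [List.length_append, List.length_cons, List.length_reverse] at hfuel ⊢
        omega

theorem adjA_eq_adjB (ss : List String) : pvAdjA ss = pvAdjB ss := by
  unfold pvAdjA pvAdjB
  apply PySem.List.foldl_congr_mem
  intro adj s _
  by_cases hc : adj.contains (pvFirst s) = true
  · rw [PySem.Dict.setdefault_of_contains adj _ hc]
    simp [hc]
  · have hc' : adj.contains (pvFirst s) = false := by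
      rcases h : adj.contains (pvFirst s) with _ | _
      · rfl
      · exact absurd h hc
    rw [PySem.Dict.setdefault_of_not_contains adj _ hc']
    simp [hc']

-- ===== VERDICT (by name: the statement is the Claim_ definition above) =====
theorem pSum_single (adj : PySem.Dict Char (List Char)) (c : Char) :
    pSum adj [c] [c] = 0 := by
  unfold pSum
  simp

theorem can_form_circle_spec : Claim_equal_can_form_circle := by
  intro strings _
  unfold Spec_can_form_circle can_form_circle can_form_circle_alt
  cases hss : strings.filter (fun s => !(s == "")) with
  | nil => rfl
  | cons s0 rest =>
    have hmem0 : s0 ∈ strings.filter (fun s => !(s == "")) := by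
      rw [hss]; exact List.mem_cons_self
    have hs0 : (!(s0 == "")) = true := (List.mem_filter.mp hmem0).2
    simp only [hs0, if_true]
    rw [← adjA_eq_adjB]
    have hinit : PySem.Set.add PySem.Set.empty (pvFirst s0) = [pvFirst s0] := rfl
    rw [hinit]
    set adj := pvAdjA (s0 :: rest) with hadj
    set c0 := pvFirst s0 with hc0
    set N := adj.values.flatten.length + 2 with hN
    have hfuel : 1 + ((PySem.Set.ofList adj.values.flatten).diff [c0]).length < N := by
      have h1 : ((PySem.Set.ofList adj.values.flatten).diff [c0]).length
          ≤ (PySem.Set.ofList adj.values.flatten).length := List.length_filter_le _ _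
      have h2 := PySem.Set.length_ofList_le adj.values.flatten
      omega
    have hA := bfsA_spec adj c0 N [c0] [c0] false (List.nodup_singleton c0)
      (List.nodup_singleton c0) (fun c hc => hc) List.mem_cons_self
      (fun c hc => (List.mem_singleton.mp hc) ▸ PvReach.refl)
      (fun c hc hcq => absurd hc hcq)
      (by rw [pSum_single]; simp)
      (by rw [pSum_single]; rfl)
      (by simpa using hfuel)
    have hB := dfsB_spec adj c0 N [c0] [c0] (List.nodup_singleton c0)
      (List.nodup_singleton c0) (fun c hc => hc) List.mem_cons_self
      (fun c hc => (List.mem_singleton.mp hc) ▸ PvReach.refl)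
      (fun c hc hcq => absurd hc hcq)
      (by simpa using hfuel)
    obtain ⟨hAnd, hAmem, hAflag⟩ := hA
    obtain ⟨hBnd, hBmem⟩ := hB
    have hperm : List.Perm (pvBfsA adj N [c0] [c0] false).1 (pvDfsB adj N [c0] [c0]) :=
      (List.perm_ext_iff_of_nodup hAnd hBnd).mpr (fun c => (hAmem c).trans (hBmem c).symm)
    have hlen : (pvBfsA adj N [c0] [c0] false).1.length = (pvDfsB adj N [c0] [c0]).length :=
      hperm.length_eq
    have hsum : ((pvBfsA adj N [c0] [c0] false).1.map (degOf adj)).sum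
        = ((pvDfsB adj N [c0] [c0]).map (degOf adj)).sum :=
      (hperm.map (degOf adj)).sum_eq
    have hstepeq : ∀ (acc : Nat), ∀ c ∈ pvDfsB adj N [c0] [c0],
        (if adj.contains c then acc + (adj.getD c []).length else acc) = acc + degOf adj c := by
      intro acc c _
      by_cases hcon : adj.contains c = true
      · simp only [hcon, if_true]
        rfl
      · have hcon' : adj.contains c = false := by
          rcases h : adj.contains c with _ | _
          · rfl
          · exact absurd h hcon
        simp only [hcon', Bool.false_eq_true, if_false]
        unfold degOf
        rw [PySem.Dict.getD_of_not_contains adj [] hcon']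
        rfl
    have hfold : (pvDfsB adj N [c0] [c0]).foldl
        (fun acc c => if adj.contains c then acc + (adj.getD c []).length else acc) 0
        = ((pvDfsB adj N [c0] [c0]).map (degOf adj)).sum := by
      rw [PySem.List.foldl_congr_mem (pvDfsB adj N [c0] [c0])
        (fun acc c => if adj.contains c then acc + (adj.getD c []).length else acc)
        (fun acc c => acc + degOf adj c) 0 hstepeq,
        PySem.List.foldl_add_nat (pvDfsB adj N [c0] [c0]) (degOf adj) 0]
      simp
    simp only [hfold, hAflag, hlen, hsum]
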